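-- pv_equiv track=rewrite | github.com/ucdsy/IndProject2025 | scripts/build_holdout3_dataset.py | expand_round_robin
-- ===== SOURCE A (Python) =====
-- def expand_round_robin(counts: dict[str, int]) -> list[str]:
--     remaining = dict(counts)
--     ordered_keys = list(counts)
--     out: list[str] = []
--     while len(out) < sum(counts.values()):
--         progressed = False
--         for key in ordered_keys:
--             if remaining.get(key, 0) > 0:
--                 out.append(key)
--                 remaining[key] -= 1
--                 progressed = True
--         if not progressed:
--             break
--     return out
-- ===== SOURCE B (Python) =====
-- def expand_round_robin(counts: dict[str, int]) -> list[str]: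
--     items = list(counts.items())
--     total = sum(v for _, v in items)
--     # histogram of positive counts: ends[c] = number of keys whose count is exactly c
--     ends: dict[int, int] = {}
--     for _, v in items:
--         if v > 0:
--             ends[v] = ends.get(v, 0) + 1
--     active = len([v for _, v in items if v > 0])
--     # number of full rounds the expansion performs: O(1) per round via the histogram
--     emitted = 0
--     rounds = 0
--     while emitted < total and active > 0:
--         emitted += active
--         rounds += 1
--         active -= ends.get(rounds, 0)
--     # transpose: one pass over the keys scatters each key into its rounds' buckets
--     buckets: list[list[str]] = [[] for _ in range(rounds)]
--     for k, v in items: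
--         for r in range(min(v, rounds)):
--             buckets[r].append(k)
--     return [k for b in buckets for k in b]
-- ===== Notes on version B (the rewrite author's own statement) =====
-- stated objective: alternative
-- what changed: B never replays rounds over the key list: it builds a histogram of the positive counts once, derives the number of rounds at O(1) per round from that histogram (where A rescans all keys and re-sums all values at every while-check), and emits the output by a single bucket-transpose pass scattering each key into the buckets of the rounds it occupies; same total cost on dense inputs, so no speed is claimed.
import Mathlib
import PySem

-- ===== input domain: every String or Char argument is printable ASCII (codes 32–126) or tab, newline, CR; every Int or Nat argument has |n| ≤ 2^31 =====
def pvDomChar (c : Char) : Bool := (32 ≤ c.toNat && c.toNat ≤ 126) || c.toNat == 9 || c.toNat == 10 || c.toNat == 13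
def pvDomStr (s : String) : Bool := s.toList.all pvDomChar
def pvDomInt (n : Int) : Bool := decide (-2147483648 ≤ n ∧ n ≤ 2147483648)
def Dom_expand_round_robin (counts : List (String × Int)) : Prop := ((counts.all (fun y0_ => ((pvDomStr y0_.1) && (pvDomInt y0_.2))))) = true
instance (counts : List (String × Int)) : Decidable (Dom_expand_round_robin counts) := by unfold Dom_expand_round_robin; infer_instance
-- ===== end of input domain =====

-- B replaces A's per-round rescan of every key (with a recomputed sum of all values at each
-- while-check) by a count histogram that determines the number of rounds, and a single
-- bucket-transpose pass over the keys; objective: alternative algorithm (no speed claimed).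

-- ===== PORT A =====
-- body of A's inner 'for key in ordered_keys' loop: state = (remaining, out, progressed)
def pvStepA (s : PySem.Dict String Int × List String × Bool) (k : String) :
    PySem.Dict String Int × List String × Bool :=
  if 0 < s.1.getD k 0 then (s.1.insert k (s.1.getD k 0 - 1), s.2.1 ++ [k], true) else s

-- A's 'while' loop; fuel total.toNat + 1 bounds its iterations: each entered round
-- requires out.length < total and every progressing round grows out by at least 1.
def pvLoopA (ordered : List String) (total : Int) :
    Nat → PySem.Dict String Int → List String → List String
  | 0, _, out => out
  | fuel + 1, rem, out =>
    if (out.length : Int) < total then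
      let r := ordered.foldl pvStepA (rem, out, false)
      if r.2.2 then pvLoopA ordered total fuel r.1 r.2.1 else r.2.1
    else out

def expand_round_robin (counts : List (String × Int)) : List String :=
  let remaining := PySem.Dict.ofList counts     -- remaining = dict(counts)
  let ordered_keys := remaining.keys            -- ordered_keys = list(counts)
  -- sum(counts.values()): counts is never mutated, so the sum Python recomputes
  -- at each while-check is this constant
  let total := remaining.values.sum
  pvLoopA ordered_keys total (total.toNat + 1) remaining []

-- ===== PORT B =====
-- body of B's histogram loop: ends[v] = ends.get(v, 0) + 1 for positive v
def pvEndsStep (d : PySem.Dict Int Int) (p : String × Int) : PySem.Dict Int Int :=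
  if 0 < p.2 then d.insert p.2 (d.getD p.2 0 + 1) else d

-- B's 'while emitted < total and active > 0' loop, returning rounds; fuel total.toNat + 1
-- bounds its iterations: each entered iteration has emitted < total and adds active ≥ 1.
def pvRoundsLoop (ends : PySem.Dict Int Int) (total : Int) :
    Nat → Int → Int → Int → Int
  | 0, _, rounds, _ => rounds
  | fuel + 1, emitted, rounds, active =>
    if emitted < total ∧ 0 < active then
      pvRoundsLoop ends total fuel (emitted + active) (rounds + 1)
        (active - ends.getD (rounds + 1) 0)
    else rounds

-- body of B's scatter loop: for r in range(min(v, rounds)): buckets[r].append(k)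
-- (r drawn from range(min(v, rounds)) is ≥ 0, so buckets[r] is exactly .modify r.toNat)
def pvScatter (rounds : Int) (bl : List (List String)) (p : String × Int) :
    List (List String) :=
  (PySem.List.pyRange 0 (min p.2 rounds) 1).foldl
    (fun bl r => bl.modify r.toNat (· ++ [p.1])) bl

def expand_round_robin_alt (counts : List (String × Int)) : List String :=
  let items := (PySem.Dict.ofList counts).items            -- items = list(counts.items())
  let total := (items.map Prod.snd).sum                    -- total = sum(v for _, v in items)
  let ends := items.foldl pvEndsStep PySem.Dict.empty
  let active := ((items.filter (fun p => 0 < p.2)).map Prod.snd).length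
  let rounds := pvRoundsLoop ends total (total.toNat + 1) 0 0 (active : Int)
  let buckets := (PySem.List.pyRange 0 rounds 1).map (fun _ => ([] : List String))
  let buckets := items.foldl (pvScatter rounds) buckets
  buckets.flatMap id                                       -- [k for b in buckets for k in b]

-- ===== PRECONDITION & SPEC =====
def Spec_expand_round_robin (counts : List (String × Int)) (out : List String) : Prop := out = expand_round_robin_alt counts
instance (counts : List (String × Int)) (out : List String) : Decidable (Spec_expand_round_robin counts out) := by unfold Spec_expand_round_robin; infer_instance

-- ===== CLAIM (what is proved, stated in full; the proofs are below) =====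
def Claim_equal_expand_round_robin : Prop := ∀ (counts : List (String × Int)), Dom_expand_round_robin counts → Spec_expand_round_robin counts (expand_round_robin counts)

-- ===== LEMMAS AND PROOFS =====

-- ---- shared abstract vocabulary: rounds over the item list zs ----

-- one round of A decrements each positive entry
def pvDec (p : String × Int) : String × Int := (p.1, if 0 < p.2 then p.2 - 1 else p.2)

-- keys emitted in round r (0-based): those with count > r
def pvRound (zs : List (String × Int)) (r : Nat) : List String :=
  (zs.filter (fun p => (r : Int) < p.2)).map Prod.fst

-- output after j full rounds
def pvRM (zs : List (String × Int)) (j : Nat) : List String :=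
  (List.range j).flatMap (pvRound zs)

-- number of keys still active after j rounds
def pvCnt (zs : List (String × Int)) (j : Nat) : Nat :=
  (zs.filter (fun p => (j : Int) < p.2)).length

-- abstract form of A's loop over the plain item list
def pvLAbs (total : Int) : Nat → List (String × Int) → List String → List String
  | 0, _, out => out
  | fuel + 1, ws, out =>
    if (out.length : Int) < total then
      if ws.any (fun p => 0 < p.2) then
        pvLAbs total fuel (ws.map pvDec) (out ++ (ws.filter (fun p => 0 < p.2)).map Prod.fst)
      else out
    else out

-- abstract form of B's rounds loop: j = rounds so far
def pvLoopN (total : Int) (zs : List (String × Int)) : Nat → Nat → Nat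
  | 0, j => j
  | fuel + 1, j =>
    if ((pvRM zs j).length : Int) < total ∧ 0 < pvCnt zs j then
      pvLoopN total zs fuel (j + 1)
    else j

-- ---- A-side: the dict loop is the abstract loop ----

lemma pv_map_overwrite (pre rest : List (String × Int)) (k : String) (v v0 : Int)
    (hpre : ∀ p ∈ pre, p.1 ≠ k) (hrest : ∀ p ∈ rest, p.1 ≠ k) :
    (pre ++ (k, v0) :: rest).map (fun p => if (p.1 == k) = true then (k, v) else p)
      = pre ++ (k, v) :: rest := by
  have hid : ∀ (l : List (String × Int)), (∀ p ∈ l, p.1 ≠ k) →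
      l.map (fun p => if (p.1 == k) = true then (k, v) else p) = l := by
    intro l hl
    induction l with
    | nil => rfl
    | cons q t ih =>
        have hq : ¬ ((q.1 == k) = true) := by
          simpa using hl q (List.mem_cons_self ..)
        simp only [List.map_cons, if_neg hq, List.cons.injEq, true_and]
        exact ih fun p hp => hl p (List.mem_cons_of_mem _ hp)
  rw [List.map_append, List.map_cons, hid pre hpre, hid rest hrest]
  simp

lemma pv_roundA (pre zs : List (String × Int)) (out : List String) (prog : Bool)
    (hnd : ((pre ++ zs).map Prod.fst).Nodup) :
    (zs.map Prod.fst).foldl pvStepA (PySem.Dict.mk (pre ++ zs), out, prog)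
      = (PySem.Dict.mk (pre ++ zs.map pvDec),
         out ++ (zs.filter (fun p => 0 < p.2)).map Prod.fst,
         prog || zs.any (fun p => 0 < p.2)) := by
  induction zs generalizing pre out prog with
  | nil => simp
  | cons p rest ih =>
      obtain ⟨k, v⟩ := p
      have hnd' : (pre.map Prod.fst ++ k :: rest.map Prod.fst).Nodup := by
        simpa using hnd
      have hkpre : ∀ q ∈ pre, q.1 ≠ k := by
        intro q hq he
        have hm : q.1 ∈ pre.map Prod.fst := List.mem_map_of_mem hq
        have hm2 : q.1 ∈ k :: rest.map Prod.fst := by rw [he]; exact List.mem_cons_self ..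
        exact ((List.nodup_append.mp hnd').2.2 q.1 hm q.1 hm2) rfl
      have hkrest : ∀ q ∈ rest, q.1 ≠ k := by
        intro q hq he
        have hm : q.1 ∈ rest.map Prod.fst := List.mem_map_of_mem hq
        rw [he] at hm
        exact (List.nodup_cons.mp (List.nodup_append.mp hnd').2.1).1 hm
      have hmem : (k, v) ∈ (PySem.Dict.mk (pre ++ (k, v) :: rest)).items := by
        simp
      have hndk : (PySem.Dict.mk (pre ++ (k, v) :: rest)).keys.Nodup := by
        simpa [PySem.Dict.keys] using hnd
      have hget : (PySem.Dict.mk (pre ++ (k, v) :: rest)).getD k 0 = v :=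
        PySem.Dict.getD_of_mem_items _ hmem hndk 0
      have hcon : (PySem.Dict.mk (pre ++ (k, v) :: rest)).contains k = true := by
        refine (PySem.Dict.contains_iff_mem_keys _ _).mpr ?_
        simp [PySem.Dict.keys]
      have hins : ∀ w : Int, (PySem.Dict.mk (pre ++ (k, v) :: rest)).insert k w
          = PySem.Dict.mk (pre ++ (k, w) :: rest) := by
        intro w
        apply PySem.Dict.ext
        rw [PySem.Dict.items_insert_of_contains _ _ hcon]
        exact pv_map_overwrite pre rest k w v hkpre hkrest
      simp only [List.map_cons, List.foldl_cons, pvStepA, hget, hins]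
      by_cases hv : 0 < v
      · rw [if_pos hv]
        have hnd2 : (((pre ++ [(k, v - 1)]) ++ rest).map Prod.fst).Nodup := by
          simpa using hnd'
        have := ih (pre ++ [(k, v - 1)]) (out ++ [k]) true hnd2
        simp only [List.append_assoc, List.singleton_append] at this
        rw [this]
        simp [pvDec, hv]
      · rw [if_neg hv]
        have hnd2 : (((pre ++ [(k, v)]) ++ rest).map Prod.fst).Nodup := by
          simpa using hnd'
        have := ih (pre ++ [(k, v)]) out prog hnd2
        simp only [List.append_assoc, List.singleton_append] at this
        rw [this]
        simp [pvDec, hv]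

lemma pv_la_unroll (total : Int) (fuel : Nat) (ws : List (String × Int))
    (hnd : (ws.map Prod.fst).Nodup) (out : List String) :
    pvLoopA (ws.map Prod.fst) total fuel (PySem.Dict.mk ws) out
      = pvLAbs total fuel ws out := by
  induction fuel generalizing ws out with
  | zero => rfl
  | succ fuel ih =>
      simp only [pvLoopA, pvLAbs]
      by_cases hlt : (out.length : Int) < total
      · have hrA := pv_roundA [] ws out false (by simpa using hnd)
        simp only [List.nil_append] at hrA
        rw [if_pos hlt, if_pos hlt, hrA]
        simp only [Bool.false_or]
        by_cases hp : ws.any (fun p => 0 < p.2)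
        · rw [if_pos hp, if_pos hp]
          have hfst : (ws.map pvDec).map Prod.fst = ws.map Prod.fst := by
            simp [pvDec, Function.comp_def]
          have hnd2 : ((ws.map pvDec).map Prod.fst).Nodup := by rw [hfst]; exact hnd
          have := ih (ws.map pvDec) hnd2 (out ++ (ws.filter (fun p => 0 < p.2)).map Prod.fst)
          rw [hfst] at this
          exact this
        · have hfil : ws.filter (fun p => 0 < p.2) = [] := by
            rw [List.filter_eq_nil_iff]
            intro q hq hq2
            exact hp (List.any_eq_true.mpr ⟨q, hq, hq2⟩)
          simp [hp, hfil]
      · simp [hlt]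

-- ---- round bookkeeping ----

lemma pv_dec_filter (ws : List (String × Int)) (r : Nat) :
    (ws.map pvDec).filter (fun p => (r : Int) < p.2)
      = (ws.filter (fun p => ((r : Int) + 1) < p.2)).map pvDec := by
  induction ws with
  | nil => rfl
  | cons p rest ih =>
      by_cases h : ((r : Int) + 1) < p.2
      · have h1 : (r : Int) < (pvDec p).2 := by
          simp only [pvDec]; split_ifs with h0 <;> omega
        simp [h, h1, ih]
      · have h1 : ¬ (r : Int) < (pvDec p).2 := by
          simp only [pvDec]; split_ifs with h0 <;> omega
        simp [h, h1, ih]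

lemma pv_cnt_round (zs : List (String × Int)) (j : Nat) :
    pvCnt zs j = (pvRound zs j).length := by
  simp [pvCnt, pvRound]

lemma pv_rm_succ (zs : List (String × Int)) (j : Nat) :
    pvRM zs (j + 1) = pvRM zs j ++ pvRound zs j := by
  simp [pvRM, List.range_succ]

-- A's abstract loop computes pvRM of the round count that pvLoopN computes
lemma pv_la_rm (total : Int) (zs : List (String × Int)) (fuel : Nat) :
    ∀ (j : Nat) (ws : List (String × Int)),
      (∀ r : Nat, (ws.filter (fun p => (r : Int) < p.2)).map Prod.fst = pvRound zs (j + r)) →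
      pvLAbs total fuel ws (pvRM zs j) = pvRM zs (pvLoopN total zs fuel j) := by
  induction fuel with
  | zero => intro j ws _; rfl
  | succ fuel ih =>
      intro j ws H
      have H0 : (ws.filter (fun p => (0 : Int) < p.2)).map Prod.fst = pvRound zs j := by
        have := H 0
        simpa using this
      have hany : (ws.any (fun p => 0 < p.2) = true) ↔ 0 < pvCnt zs j := by
        rw [pv_cnt_round, ← H0]
        constructor
        · intro h
          rcases List.any_eq_true.mp h with ⟨q, hq, hq2⟩
          have : q ∈ ws.filter (fun p => (0 : Int) < p.2) := List.mem_filter.mpr ⟨hq, hq2⟩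
          have : q.1 ∈ (ws.filter (fun p => (0 : Int) < p.2)).map Prod.fst :=
            List.mem_map_of_mem this
          exact List.length_pos_of_mem this
        · intro h
          rcases List.exists_mem_of_length_pos h with ⟨x, hx⟩
          rcases List.mem_map.mp hx with ⟨q, hq, _⟩
          exact List.any_eq_true.mpr ⟨q, (List.mem_filter.mp hq).1, (List.mem_filter.mp hq).2⟩
      simp only [pvLAbs, pvLoopN]
      by_cases hlt : ((pvRM zs j).length : Int) < total
      · rw [if_pos hlt]
        by_cases hp : ws.any (fun p => 0 < p.2)
        · rw [if_pos hp, if_pos ⟨hlt, hany.mp hp⟩]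
          have hout : pvRM zs j ++ (ws.filter (fun p => (0 : Int) < p.2)).map Prod.fst
              = pvRM zs (j + 1) := by rw [H0, pv_rm_succ]
          rw [hout]
          refine ih (j + 1) (ws.map pvDec) ?_
          intro r
          rw [pv_dec_filter]
          have : ((ws.filter (fun p => ((r : Int) + 1) < p.2)).map pvDec).map Prod.fst
              = (ws.filter (fun p => ((r : Int) + 1) < p.2)).map Prod.fst := by
            simp [pvDec, Function.comp_def]
          rw [this]
          have hcast : ((r : Int) + 1) = (((r + 1 : Nat) : Int)) := by push_cast; ring
          rw [hcast, H (r + 1)]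
          congr 1
          omega
        · have hcnt : ¬ 0 < pvCnt zs j := fun h => hp ((hany.mpr h))
          rw [if_neg hp, if_neg (show ¬ (((pvRM zs j).length : Int) < total ∧ 0 < pvCnt zs j) from
            fun h => hcnt h.2)]
      · rw [if_neg hlt, if_neg (by tauto)]

-- ---- B-side: the histogram, the rounds loop, the buckets ----

-- the ends histogram answers count queries on the positive values
lemma pv_ends_getD (zs : List (String × Int)) (n : Int) :
    (zs.foldl pvEndsStep PySem.Dict.empty).getD n 0
      = (((zs.filter (fun p => 0 < p.2)).map Prod.snd).count n : Int) := by
  have hfold : ∀ (l : List (String × Int)) (d : PySem.Dict Int Int),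
      l.foldl pvEndsStep d
        = ((l.filter (fun p => 0 < p.2)).map Prod.snd).foldl
            (fun d x => d.insert x (d.getD x 0 + 1)) d := by
    intro l
    induction l with
    | nil => intro d; rfl
    | cons p rest ih =>
        intro d
        by_cases h : 0 < p.2
        · simp [h, pvEndsStep, ih]
        · simp [h, pvEndsStep, ih]
  rw [hfold, PySem.Dict.foldl_insert_getD_add_one_eq_counter, PySem.Dict.getD_counter]

-- active bookkeeping: #{v > j} − #{v = j+1} = #{v > j+1}
lemma pv_cnt_step (zs : List (String × Int)) (j : Nat) :
    (pvCnt zs j : Int) - (((zs.filter (fun p => 0 < p.2)).map Prod.snd).count ((j : Int) + 1) : Int)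
      = (pvCnt zs (j + 1) : Int) := by
  have hc : ∀ l : List (String × Int),
      ((l.filter (fun p => 0 < p.2)).map Prod.snd).count ((j : Int) + 1)
        = l.countP (fun p => decide (0 < p.2) && (p.2 == (j : Int) + 1)) := by
    intro l
    rw [List.count_eq_countP, List.countP_map, List.countP_filter]
    apply List.countP_congr
    intro p _
    simp only [Function.comp_def]
    rw [Bool.and_comm]
  have hn : ∀ l : List (String × Int), pvCnt l j = l.countP (fun p => decide ((j : Int) < p.2)) := by
    intro l; rw [pvCnt, ← List.countP_eq_length_filter]
  have hn1 : ∀ l : List (String × Int),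
      pvCnt l (j + 1) = l.countP (fun p => decide ((j : Int) + 1 < p.2)) := by
    intro l
    rw [pvCnt, ← List.countP_eq_length_filter]
    apply List.countP_congr
    intro p _
    have : (((j + 1 : Nat)) : Int) = (j : Int) + 1 := by push_cast; ring
    rw [this]
  rw [hc, hn, hn1]
  induction zs with
  | nil => simp
  | cons p rest ih =>
      simp only [List.countP_cons]
      by_cases h0 : (0 : Int) < p.2 <;> by_cases hj : (j : Int) < p.2 <;>
        by_cases he : p.2 = (j : Int) + 1 <;> by_cases hj1 : (j : Int) + 1 < p.2 <;>
        simp [h0, hj, he, hj1] <;> omega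

-- emitted bookkeeping
lemma pv_rm_len_succ (zs : List (String × Int)) (j : Nat) :
    (pvRM zs (j + 1)).length = (pvRM zs j).length + pvCnt zs j := by
  rw [pv_rm_succ, List.length_append, pv_cnt_round]

-- B's concrete rounds loop tracks the abstract one
lemma pv_lb_loopN (total : Int) (zs : List (String × Int)) (fuel : Nat) :
    ∀ (j : Nat),
      pvRoundsLoop (zs.foldl pvEndsStep PySem.Dict.empty) total fuel
          ((pvRM zs j).length : Int) (j : Int) ((pvCnt zs j : Nat) : Int)
        = ((pvLoopN total zs fuel j : Nat) : Int) := by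
  induction fuel with
  | zero => intro j; rfl
  | succ fuel ih =>
      intro j
      simp only [pvRoundsLoop, pvLoopN]
      by_cases hc : ((pvRM zs j).length : Int) < total ∧ 0 < pvCnt zs j
      · have hc' : ((pvRM zs j).length : Int) < total ∧ (0 : Int) < ((pvCnt zs j : Nat) : Int) := by
          exact ⟨hc.1, by exact_mod_cast hc.2⟩
        rw [if_pos hc', if_pos hc]
        have hemit : ((pvRM zs j).length : Int) + ((pvCnt zs j : Nat) : Int)
            = ((pvRM zs (j + 1)).length : Int) := by
          rw [pv_rm_len_succ]; push_cast; ring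
        have hact : ((pvCnt zs j : Nat) : Int)
              - (zs.foldl pvEndsStep PySem.Dict.empty).getD (((j + 1 : Nat) : Int)) 0
            = ((pvCnt zs (j + 1) : Nat) : Int) := by
          rw [pv_ends_getD]
          have : (((j + 1 : Nat)) : Int) = (j : Int) + 1 := by push_cast; ring
          rw [this]
          exact pv_cnt_step zs j
        have hj1 : ((j : Int) + 1) = (((j + 1 : Nat) : Int)) := by push_cast; ring
        rw [hemit, hj1, hact]
        exact ih (j + 1)
      · have hc' : ¬ (((pvRM zs j).length : Int) < total ∧ (0 : Int) < ((pvCnt zs j : Nat) : Int)) := by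
          intro h; exact hc ⟨h.1, by exact_mod_cast h.2⟩
        rw [if_neg hc', if_neg hc]

-- scatter of one key into the first min(v, R) buckets, on a bucket list of shape map g
lemma pv_scatter_one (Rn : Nat) (g : Nat → List String) (k : String) (v : Int) :
    pvScatter (Rn : Int) ((List.range Rn).map g) (k, v)
      = (List.range Rn).map (fun (r : Nat) => if (r : Int) < v then g r ++ [k] else g r) := by
  unfold pvScatter
  have hmin : min v (Rn : Int) ≤ (Rn : Int) := min_le_right _ _
  -- rewrite the int range as a Nat range
  have hrange : PySem.List.pyRange 0 (min v (Rn : Int)) 1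
      = (List.range (min v (Rn : Int)).toNat).map (fun t : Nat => (t : Int)) := by
    rw [PySem.List.pyRange_one]
    simp
  rw [hrange]
  set m : Nat := (min v (Rn : Int)).toNat with hm
  have hmle : m ≤ Rn := by omega
  have hiff : ∀ r : Nat, r < Rn → (r < m ↔ (r : Int) < v) := by
    intro r hr
    constructor
    · intro h; omega
    · intro h; omega
  -- fold over the Nat range appends k to buckets 0..m-1
  have hfold : ∀ (m' : Nat), m' ≤ Rn →
      ((List.range m').map (fun t : Nat => (t : Int))).foldl
          (fun bl r => bl.modify r.toNat (· ++ [k])) ((List.range Rn).map g)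
        = (List.range Rn).map (fun (r : Nat) => if r < m' then g r ++ [k] else g r) := by
    intro m'
    induction m' with
    | zero =>
        intro _
        simp
    | succ m' ih =>
        intro hle
        rw [List.range_succ, List.map_append, List.foldl_append, ih (by omega)]
        simp only [List.map_cons, List.map_nil, List.foldl_cons, List.foldl_nil, Int.toNat_natCast]
        apply List.ext_getElem
        · simp
        · intro i h1 h2
          have hiR : i < Rn := by simpa using h2
          rw [List.getElem_modify]
          simp only [List.getElem_map, List.getElem_range]
          by_cases hie : m' = i
          · subst hie
            simp
          · rw [if_neg hie]
            by_cases hlt : i < m'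
            · rw [if_pos hlt, if_pos (by omega)]
            · rw [if_neg hlt, if_neg (by omega)]
  rw [hfold m hmle]
  apply List.map_congr_left
  intro r hr
  have := hiff r (List.mem_range.mp hr)
  by_cases h : r < m
  · rw [if_pos h, if_pos (this.mp h)]
  · rw [if_neg h, if_neg (fun hh => h (this.mpr hh))]

-- the whole scatter pass fills bucket r with round r
lemma pv_scatter_all (Rn : Nat) (zs : List (String × Int)) :
    ∀ (g : Nat → List String),
      zs.foldl (pvScatter (Rn : Int)) ((List.range Rn).map g)
        = (List.range Rn).map
            (fun (r : Nat) => g r ++ (zs.filter (fun p => (r : Int) < p.2)).map Prod.fst) := by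
  induction zs with
  | nil =>
      intro g
      simp
  | cons p rest ih =>
      intro g
      obtain ⟨k, v⟩ := p
      simp only [List.foldl_cons]
      rw [pv_scatter_one, ih]
      apply List.map_congr_left
      intro r _
      simp only [List.filter_cons]
      by_cases h : (r : Int) < v
      · simp [h, List.append_assoc]
      · simp [h]

-- ---- assembly ----

theorem pv_main (counts : List (String × Int)) :
    expand_round_robin counts = expand_round_robin_alt counts := by
  unfold expand_round_robin expand_round_robin_alt
  dsimp only
  set zs := (PySem.Dict.ofList counts).items with hzs
  have hnd : (zs.map Prod.fst).Nodup := by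
    have := PySem.Dict.nodup_keys_ofList (ν := Int) counts
    simpa [PySem.Dict.keys] using this
  have hmk : PySem.Dict.mk zs = PySem.Dict.ofList counts := by
    apply PySem.Dict.ext
    rfl
  have hkeys : (PySem.Dict.ofList counts).keys = zs.map Prod.fst := rfl
  have hvals : (PySem.Dict.ofList counts).values = zs.map Prod.snd := rfl
  set total := (zs.map Prod.snd).sum with htot
  -- A side → abstract rounds
  have hA : pvLoopA ((PySem.Dict.ofList counts).keys) total (total.toNat + 1)
        (PySem.Dict.ofList counts) []
      = pvRM zs (pvLoopN total zs (total.toNat + 1) 0) := by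
    rw [hkeys, ← hmk, pv_la_unroll total _ zs hnd]
    have h0 : ([] : List String) = pvRM zs 0 := rfl
    rw [h0]
    refine pv_la_rm total zs _ 0 zs ?_
    intro r
    simp [pvRound]
  -- B side: rounds value
  have hactive : (((zs.filter (fun p => 0 < p.2)).map Prod.snd).length : Int)
      = ((pvCnt zs 0 : Nat) : Int) := by
    simp [pvCnt]
  have hR : pvRoundsLoop (zs.foldl pvEndsStep PySem.Dict.empty) total (total.toNat + 1)
        0 0 (((zs.filter (fun p => 0 < p.2)).map Prod.snd).length : Int)
      = ((pvLoopN total zs (total.toNat + 1) 0 : Nat) : Int) := by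
    rw [hactive]
    have h0 : (0 : Int) = ((pvRM zs 0).length : Int) := rfl
    have := pv_lb_loopN total zs (total.toNat + 1) 0
    simpa using this
  rw [hvals, hA, hR]
  -- B side: buckets
  set Rn : Nat := pvLoopN total zs (total.toNat + 1) 0 with hRn
  have hinit : (PySem.List.pyRange 0 ((Rn : Nat) : Int) 1).map (fun _ => ([] : List String))
      = (List.range Rn).map (fun _ => ([] : List String)) := by
    rw [PySem.List.pyRange_zero_nat]
    simp [Function.comp_def]
  rw [hinit, pv_scatter_all Rn zs (fun _ => [])]
  simp only [List.nil_append]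
  rw [List.flatMap_map]
  rfl

-- ===== VERDICT (by name: the statement is the Claim_ definition above) =====
theorem expand_round_robin_spec : Claim_equal_expand_round_robin := by
  intro counts _
  unfold Spec_expand_round_robin
  exact pv_main counts
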